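-- pv_equiv track=rewrite | github.com/Tanumoy25/Tanumoy25 | MonkeyMarketPart2.py | find_best_sequence
-- ===== SOURCE A (Python) =====
-- def find_best_sequence(prices):
--     """
--     This function finds the sequence of four consecutive price changes
--     that maximizes the sum of the prices where the monkey would sell.
--     """
--     # Calculate the price changes
--     price_changes = [prices[i + 1] - prices[i] for i in range(len(prices) - 1)]
--
--     max_bananas = 0
--     best_sequence = None
--
--     # We need to check all possible sequences of 4 price changes
--     for i in range(len(price_changes) - 3):  # Stop 3 steps before the end
--         # Extract the 4 consecutive changes starting from index i
--         sequence = tuple(price_changes[i:i + 4])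
--
--         # Now look for the first occurrence of this sequence in the prices
--         for j in range(i + 4, len(price_changes)):
--             # If we find a matching sequence, the monkey will sell at the price at the end of the sequence
--             if tuple(price_changes[j-3:j+1]) == sequence:
--                 max_bananas += prices[j]  # Add the price at the end of the sequence where the monkey sells
--                 break
--
--     return max_bananas
-- ===== SOURCE B (Python) =====
-- def find_best_sequence(prices):
--     # One forward pass: window k has a matching earlier window i iff k is the
--     # FIRST later recurrence for that i, so summing prices[k+3] over windows
--     # already seen equals A's per-i first-match sum.
--     price_changes = [b - a for a, b in zip(prices, prices[1:])]
--     seen = set()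
--     total = 0
--     for k in range(len(price_changes) - 3):
--         w = tuple(price_changes[k:k + 4])
--         if w in seen:
--             total += prices[k + 3]
--         seen.add(w)
--     return total
-- ===== Notes on version B (the rewrite author's own statement) =====
-- stated objective: faster
-- what changed: A rescans the rest of the change list for each 4-change window (nested loops); B makes a single forward pass with a set of already-seen windows, adding prices[k+3] exactly when window k recurred, which equals A's per-window first-later-match sum.
import Mathlib
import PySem

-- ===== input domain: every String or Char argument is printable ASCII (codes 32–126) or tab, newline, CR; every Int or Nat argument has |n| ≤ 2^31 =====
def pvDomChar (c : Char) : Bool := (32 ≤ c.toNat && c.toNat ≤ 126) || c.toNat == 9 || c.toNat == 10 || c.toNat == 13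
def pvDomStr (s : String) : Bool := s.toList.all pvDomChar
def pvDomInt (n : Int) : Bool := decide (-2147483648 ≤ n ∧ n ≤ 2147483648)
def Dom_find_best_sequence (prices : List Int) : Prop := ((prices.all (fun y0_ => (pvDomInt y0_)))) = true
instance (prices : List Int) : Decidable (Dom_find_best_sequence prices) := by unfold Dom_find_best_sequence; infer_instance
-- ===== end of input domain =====

-- B replaces A's per-window forward rescan by one pass with a set of already-seen
-- 4-change windows: window k contributes prices[k+3] iff it occurred before, which
-- is exactly A's "first later recurrence" sum (proved below).

-- ===== PORT A =====
-- inner `for j in range(i+4, len(price_changes)): if …: max_bananas += prices[j]; break`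
def pyInnerA (pc prices seq : List Int) : List Int → Int → Int
  | [], acc => acc
  | j :: rest, acc =>
      if PySem.List.slice pc (some (j - 3)) (some (j + 1)) == seq then
        acc + PySem.List.pyGetD prices j 0   -- this index is always in range when reached
      else pyInnerA pc prices seq rest acc

def find_best_sequence (prices : List Int) : Int :=
  let price_changes := (PySem.List.pyRange 0 (PySem.List.len prices - 1) 1).map
      (fun i => PySem.List.pyGetD prices (i + 1) 0 - PySem.List.pyGetD prices i 0)
  -- `best_sequence = None` is never reassigned nor read in A: omitted
  (PySem.List.pyRange 0 (PySem.List.len price_changes - 3) 1).foldl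
    (fun acc i =>
      pyInnerA price_changes prices
        (PySem.List.slice price_changes (some i) (some (i + 4)))
        (PySem.List.pyRange (i + 4) (PySem.List.len price_changes) 1) acc)
    0

-- ===== PORT B =====
def find_best_sequence_alt (prices : List Int) : Int :=
  let price_changes := (prices.zip (PySem.List.slice prices (some 1) none)).map
      (fun p => p.2 - p.1)
  ((PySem.List.pyRange 0 (PySem.List.len price_changes - 3) 1).foldl
    (fun (st : PySem.Set (List Int) × Int) k =>
      let w := PySem.List.slice price_changes (some k) (some (k + 4))
      (PySem.Set.add st.1 w,
       if PySem.Set.contains st.1 w then st.2 + PySem.List.pyGetD prices (k + 3) 0 else st.2))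
    (PySem.Set.empty, 0)).2

-- ===== PRECONDITION & SPEC =====
def Spec_find_best_sequence (prices : List Int) (out : Int) : Prop := out = find_best_sequence_alt prices
instance (prices : List Int) (out : Int) : Decidable (Spec_find_best_sequence prices out) := by unfold Spec_find_best_sequence; infer_instance

-- ===== CLAIM (what is proved, stated in full; the proofs are below) =====
def Claim_equal_find_best_sequence : Prop := ∀ (prices : List Int), Dom_find_best_sequence prices → Spec_find_best_sequence prices (find_best_sequence prices)

-- ===== LEMMAS AND PROOFS =====

-- the price-change list both programs build
def pvDiffs (prices : List Int) : List Int := (prices.zip prices.tail).map (fun p => p.2 - p.1)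
-- the 4-change window starting at k
def pvW (pc : List Int) (k : Nat) : List Int := (pc.drop k).take 4
-- the price the monkey sells at when a match ends at window k
def pvWt (prices : List Int) (k : Nat) : Int := prices.getD (k + 3) 0
-- first k' in [k, k+cnt) whose window equals seq
def pvFind (pc seq : List Int) : Nat → Nat → Option Nat
  | _, 0 => none
  | k, cnt + 1 => if pvW pc k = seq then some k else pvFind pc seq (k + 1) cnt
-- A's contribution for outer index i (its search runs over k' ∈ [i+1, N))
def pvGA (pc prices : List Int) (N i : Nat) : Int :=
  match pvFind pc (pvW pc i) (i + 1) (N - (i + 1)) with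
  | some k => pvWt prices k
  | none => 0
-- B's contribution for window k
def pvBT (pc prices : List Int) (k : Nat) : Int :=
  if pvW pc k ∈ (List.range k).map (pvW pc) then pvWt prices k else 0
-- the matching matrix: c i k ≠ 0 iff k is i's FIRST later equal window
def pvC (pc prices : List Int) (N i k : Nat) : Int :=
  if i < k ∧ k < N ∧ pvW pc k = pvW pc i ∧ (∀ j < k, i < j → pvW pc j ≠ pvW pc i)
  then pvWt prices k else 0

theorem pvA_pc (prices : List Int) :
    (PySem.List.pyRange 0 (PySem.List.len prices - 1) 1).map
      (fun i => PySem.List.pyGetD prices (i + 1) 0 - PySem.List.pyGetD prices i 0)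
      = pvDiffs prices := by
  rw [PySem.List.pyRange_one, List.map_map]
  have hL : ((PySem.List.len prices - 1) - 0).toNat = prices.length - 1 := by
    simp [PySem.List.len_eq]
  rw [hL]
  apply List.ext_getElem
  · simp [pvDiffs]
  · intro t h1 h2
    simp only [List.getElem_map, List.getElem_range, Function.comp_apply, pvDiffs,
      List.getElem_zip]
    have ht : t < prices.length - 1 := by simpa using h1
    have : ((0 : Int) + (t : Nat) + 1) = ((t + 1 : Nat) : Int) := by push_cast; ring
    rw [this]
    have : ((0 : Int) + (t : Nat)) = ((t : Nat) : Int) := by ring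
    rw [this]
    rw [PySem.List.pyGetD_natCast, PySem.List.pyGetD_natCast]
    rw [List.getD_eq_getElem prices 0 (by omega), List.getD_eq_getElem prices 0 (by omega)]
    rw [List.getElem_tail]

theorem pvFind_none (pc seq : List Int) :
    ∀ cnt k, pvFind pc seq k cnt = none → ∀ j, k ≤ j → j < k + cnt → pvW pc j ≠ seq := by
  intro cnt
  induction cnt with
  | zero => intro k _ j h1 h2; omega
  | succ n ih =>
    intro k h j h1 h2
    rw [pvFind] at h
    split_ifs at h with hw
    rcases Nat.eq_or_lt_of_le h1 with rfl | hlt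
    · exact hw
    · exact ih (k + 1) h j hlt (by omega)

theorem pvFind_some (pc seq : List Int) :
    ∀ cnt k k', pvFind pc seq k cnt = some k' →
      k ≤ k' ∧ k' < k + cnt ∧ pvW pc k' = seq ∧ ∀ j, k ≤ j → j < k' → pvW pc j ≠ seq := by
  intro cnt
  induction cnt with
  | zero => intro k k' h; simp [pvFind] at h
  | succ n ih =>
    intro k k' h
    rw [pvFind] at h
    split_ifs at h with hw
    · obtain rfl : k = k' := Option.some_inj.mp h
      exact ⟨le_refl _, by omega, hw, fun j h1 h2 => by omega⟩
    · obtain ⟨a, b, c, d⟩ := ih (k + 1) k' h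
      refine ⟨by omega, by omega, c, fun j h1 h2 => ?_⟩
      rcases Nat.eq_or_lt_of_le h1 with rfl | hlt
      · exact hw
      · exact d j hlt h2

theorem pvInnerA_eq (pc prices seq : List Int) :
    ∀ (cnt k : Nat) (acc : Int),
      pyInnerA pc prices seq (PySem.List.pyRange ((k : Int) + 3) ((k : Int) + 3 + cnt) 1) acc
        = acc + (match pvFind pc seq k cnt with
                 | some k' => pvWt prices k'
                 | none => 0) := by
  intro cnt
  induction cnt with
  | zero =>
    intro k acc
    rw [PySem.List.pyRange_one_eq_nil (by omega)]
    simp [pyInnerA, pvFind]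
  | succ n ih =>
    intro k acc
    rw [PySem.List.pyRange_one_cons (by push_cast; omega)]
    rw [pyInnerA]
    have h1 : ((k : Int) + 3 - 3) = ((k : Nat) : Int) := by ring
    have h2 : ((k : Int) + 3 + 1) = ((k : Nat) : Int) + (4 : Nat) := by push_cast; ring
    rw [h1, h2, PySem.List.slice_natCast_add]
    rw [pvFind]
    by_cases hw : pvW pc k = seq
    · rw [if_pos (by simpa [pvW] using hw)]
      have h3 : ((k : Int) + 3) = ((k + 3 : Nat) : Int) := by push_cast; ring
      rw [h3, PySem.List.pyGetD_natCast]
      simp [hw, pvWt]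
    · rw [if_neg (by simpa [pvW] using hw)]
      have h4 : ((k : Int) + (4 : Nat)) = ((k + 1 : Nat) : Int) + 3 := by push_cast; ring
      have h5 : ((k : Int) + 3 + ((n + 1 : Nat) : Int)) = ((k + 1 : Nat) : Int) + 3 + n := by
        push_cast; ring
      rw [h4, h5, ih (k + 1)]
      simp [hw]

theorem pvA_total (prices : List Int) :
    find_best_sequence prices
      = ((List.range (((pvDiffs prices).length : Int) - 3).toNat).map
          (pvGA (pvDiffs prices) prices (((pvDiffs prices).length : Int) - 3).toNat)).sum := by
  simp only [find_best_sequence, pvA_pc]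
  set pc := pvDiffs prices with hpc
  set n := pc.length with hn
  set N := ((n : Int) - 3).toNat with hN
  rw [PySem.List.len_eq, PySem.List.pyRange_one]
  have e1 : (((n : Int) - 3) - 0).toNat = N := by omega
  rw [e1, List.foldl_map]
  refine (PySem.List.foldl_congr_mem (l := List.range N)
    (g := fun acc k => acc + pvGA pc prices N k) _ 0 ?_).trans ?_
  swap
  · rw [PySem.List.foldl_add, zero_add]
  · intro acc k hk
    have hkN : k < N := List.mem_range.mp hk
    have hn4 : n = N + 3 := by omega
    simp only [zero_add]
    have e2 : ((k : Int) + 4) = ((k : Nat) : Int) + ((4 : Nat) : Int) := by push_cast; ring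
    rw [e2, PySem.List.slice_natCast_add]
    have e3 : ((k : Int) + ((4 : Nat) : Int)) = (((k + 1 : Nat)) : Int) + 3 := by push_cast; ring
    have e4 : ((n : Int)) = (((k + 1 : Nat)) : Int) + 3 + ((N - (k + 1) : Nat) : Int) := by
      rw [Nat.cast_sub (by omega)]; push_cast; omega
    rw [← hn, e3, e4, pvInnerA_eq]
    rfl

theorem pvB_run (pc prices : List Int) (m : Nat) :
    (List.range m).foldl
      (fun (st : PySem.Set (List Int) × Int) (k : Nat) =>
        (PySem.Set.add st.1 (pvW pc k),
         if PySem.Set.contains st.1 (pvW pc k) then st.2 + pvWt prices k else st.2))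
      (PySem.Set.empty, 0)
      = (PySem.Set.ofList ((List.range m).map (pvW pc)),
         ((List.range m).map (pvBT pc prices)).sum) := by
  induction m with
  | zero => rfl
  | succ t ih =>
    rw [List.range_succ, List.foldl_append, ih]
    simp only [List.foldl_cons, List.foldl_nil, List.map_append, List.map_cons, List.map_nil,
      List.sum_append, List.sum_cons, List.sum_nil]
    rw [Prod.mk.injEq]
    refine ⟨?_, ?_⟩
    · rw [← PySem.Set.ofList_append_singleton]
    · by_cases hmem : pvW pc t ∈ (List.range t).map (pvW pc)
      · have hc : PySem.Set.contains (PySem.Set.ofList ((List.range t).map (pvW pc)))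
            (pvW pc t) = true := by
          rw [PySem.Set.contains_iff, PySem.Set.mem_ofList]; exact hmem
        rw [hc]
        simp [pvBT, hmem]
      · have hc : PySem.Set.contains (PySem.Set.ofList ((List.range t).map (pvW pc)))
            (pvW pc t) = false := by
          rw [Bool.eq_false_iff]
          intro h
          exact hmem ((PySem.Set.mem_ofList _ _).mp ((PySem.Set.contains_iff _ _).mp h))
        rw [hc]
        simp [pvBT, hmem]

theorem pvB_total (prices : List Int) :
    find_best_sequence_alt prices
      = ((List.range (((pvDiffs prices).length : Int) - 3).toNat).map
          (pvBT (pvDiffs prices) prices)).sum := by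
  have hB : (prices.zip (PySem.List.slice prices (some 1) none)).map (fun p : Int × Int => p.2 - p.1)
      = pvDiffs prices := by rw [PySem.List.slice_from_one]; rfl
  simp only [find_best_sequence_alt, hB]
  set pc := pvDiffs prices with hpc
  set n := pc.length with hn
  set N := ((n : Int) - 3).toNat with hN
  rw [PySem.List.len_eq, PySem.List.pyRange_one]
  have e1 : (((n : Int) - 3) - 0).toNat = N := by omega
  rw [e1, List.foldl_map]
  have hfun : (fun (st : PySem.Set (List Int) × Int) (k : Nat) =>
      (fun (st : PySem.Set (List Int) × Int) (i : Int) =>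
        (PySem.Set.add st.1 (PySem.List.slice pc (some i) (some (i + 4))),
         if PySem.Set.contains st.1 (PySem.List.slice pc (some i) (some (i + 4)))
         then st.2 + PySem.List.pyGetD prices (i + 3) 0 else st.2)) st ((0 : Int) + k))
      = (fun (st : PySem.Set (List Int) × Int) (k : Nat) =>
        (PySem.Set.add st.1 (pvW pc k),
         if PySem.Set.contains st.1 (pvW pc k) then st.2 + pvWt prices k else st.2)) := by
    funext st k
    simp only [zero_add]
    have e2 : ((k : Int) + 4) = ((k : Nat) : Int) + ((4 : Nat) : Int) := by push_cast; ring
    have e3 : ((k : Int) + 3) = ((k + 3 : Nat) : Int) := by push_cast; ring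
    rw [e2, PySem.List.slice_natCast_add, e3, PySem.List.pyGetD_natCast]
    rfl
  rw [hfun, pvB_run]

theorem pvA_row (pc prices : List Int) (N i : Nat) (hi : i < N) :
    pvGA pc prices N i = ∑ k ∈ Finset.range N, pvC pc prices N i k := by
  unfold pvGA
  cases h : pvFind pc (pvW pc i) (i + 1) (N - (i + 1)) with
  | none =>
    have hn := pvFind_none pc (pvW pc i) _ _ h
    rw [Finset.sum_eq_zero]
    intro k hk
    unfold pvC
    rw [if_neg]
    rintro ⟨h1, h2, h3, _⟩
    exact hn k (by omega) (by omega) h3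
  | some k0 =>
    obtain ⟨a, b, c, d⟩ := pvFind_some pc (pvW pc i) _ _ _ h
    rw [Finset.sum_eq_single k0]
    · unfold pvC
      rw [if_pos ⟨by omega, by omega, c, fun j hj hij => d j (by omega) hj⟩]
    · intro b' hb' hne
      unfold pvC
      rw [if_neg]
      rintro ⟨h1, h2, h3, h4⟩
      rcases Nat.lt_or_ge b' k0 with hlt | hge
      · exact d b' (by omega) hlt h3
      · exact h4 k0 (by omega) (by omega) c
    · intro hk0
      exact absurd (Finset.mem_range.mpr (by omega)) hk0

theorem pvB_col (pc prices : List Int) (N k : Nat) (hk : k < N) :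
    pvBT pc prices k = ∑ i ∈ Finset.range N, pvC pc prices N i k := by
  unfold pvBT
  by_cases hex : pvW pc k ∈ (List.range k).map (pvW pc)
  · rw [if_pos hex]
    obtain ⟨i0, hi0, he0⟩ := by simpa using hex
    set P : Nat → Prop := fun j => j < k ∧ pvW pc j = pvW pc k with hP
    have hPdec : DecidablePred P := fun j => by rw [hP]; infer_instance
    set m := Nat.findGreatest P k with hm
    have hPm : P m := Nat.findGreatest_spec (le_of_lt hi0) ⟨hi0, he0⟩
    have hgr : ∀ j, m < j → j ≤ k → ¬ P j := fun j h1 h2 => Nat.findGreatest_is_greatest h1 h2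
    rw [Finset.sum_eq_single m]
    · unfold pvC
      have hcond : m < k ∧ k < N ∧ pvW pc k = pvW pc m ∧
          (∀ j < k, m < j → pvW pc j ≠ pvW pc m) := by
        refine ⟨hPm.1, hk, hPm.2.symm, ?_⟩
        intro j hj hmj hje
        exact hgr j hmj (by omega) ⟨hj, by rw [hje, hPm.2]⟩
      rw [if_pos hcond]
    · intro b hb hne
      unfold pvC
      rw [if_neg]
      rintro ⟨h1, h2, h3, h4⟩
      rcases Nat.lt_or_ge b m with hlt | hge
      · exact h4 m hPm.1 hlt (by rw [hPm.2, h3])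
      · exact hgr b (by omega) (by omega) ⟨h1, h3.symm⟩
    · intro hm'
      exact absurd (Finset.mem_range.mpr (by omega)) hm'
  · rw [if_neg hex]
    rw [Finset.sum_eq_zero]
    intro i hi
    unfold pvC
    rw [if_neg]
    rintro ⟨h1, h2, h3, h4⟩
    exact hex (List.mem_map.mpr ⟨i, List.mem_range.mpr h1, h3.symm⟩)

theorem pvCore (pc prices : List Int) (N : Nat) :
    ((List.range N).map (pvGA pc prices N)).sum
      = ((List.range N).map (pvBT pc prices)).sum := by
  have h1 : ((List.range N).map (pvGA pc prices N)).sum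
      = ∑ i ∈ Finset.range N, pvGA pc prices N i := rfl
  have h2 : ((List.range N).map (pvBT pc prices)).sum
      = ∑ k ∈ Finset.range N, pvBT pc prices k := rfl
  rw [h1, h2]
  rw [Finset.sum_congr rfl (fun i hi => pvA_row pc prices N i (Finset.mem_range.mp hi))]
  rw [Finset.sum_congr rfl (fun k hk => pvB_col pc prices N k (Finset.mem_range.mp hk))]
  exact Finset.sum_comm

-- ===== VERDICT (by name: the statement is the Claim_ definition above) =====
theorem find_best_sequence_spec : Claim_equal_find_best_sequence := by
  intro prices _
  unfold Spec_find_best_sequence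
  rw [pvA_total, pvB_total, pvCore]
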